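-- pv_equiv track=rewrite | github.com/masoudhashemi/vine-verifiers | verifiers/envs/imprisoned_gym_env.py | _find_action_index
-- ===== SOURCE A (Python) =====
-- from typing import Any, Dict, List, Tuple, Optional
--
-- def _find_action_index(action_text: str, available_actions: List[str]) -> Optional[int]:
--     """Find the closest matching action index from available actions."""
--     if not available_actions:
--         return None
--     for i, avail_action in enumerate(available_actions):
--         if action_text.lower() == avail_action.lower():
--             return i
--     for i, avail_action in enumerate(available_actions):
--         if avail_action.lower() in action_text.lower() or action_text.lower() in avail_action.lower():
--             return i
--     return None
-- ===== SOURCE B (Python) =====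
-- from typing import List, Optional
--
-- def _find_action_index(action_text: str, available_actions: List[str]) -> Optional[int]:
--     """Single pass tracking the first exact and first containment match."""
--     at = action_text.lower()
--     first_exact = None
--     first_contain = None
--     for i, avail in enumerate(available_actions):
--         al = avail.lower()
--         if first_exact is None and at == al:
--             first_exact = i
--         if first_contain is None and (al in at or at in al):
--             first_contain = i
--     return first_exact if first_exact is not None else first_contain
-- ===== Notes on version B (the rewrite author's own statement) =====
-- stated objective: faster
-- what changed: Replaces A's two sequential scans (exact-match scan, then containment scan) by a single pass over enumerate that maintains first_exact and first_contain accumulators and prefers first_exact at the end; action_text.lower() is computed once before the loop instead of on every comparison.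
import Mathlib
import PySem

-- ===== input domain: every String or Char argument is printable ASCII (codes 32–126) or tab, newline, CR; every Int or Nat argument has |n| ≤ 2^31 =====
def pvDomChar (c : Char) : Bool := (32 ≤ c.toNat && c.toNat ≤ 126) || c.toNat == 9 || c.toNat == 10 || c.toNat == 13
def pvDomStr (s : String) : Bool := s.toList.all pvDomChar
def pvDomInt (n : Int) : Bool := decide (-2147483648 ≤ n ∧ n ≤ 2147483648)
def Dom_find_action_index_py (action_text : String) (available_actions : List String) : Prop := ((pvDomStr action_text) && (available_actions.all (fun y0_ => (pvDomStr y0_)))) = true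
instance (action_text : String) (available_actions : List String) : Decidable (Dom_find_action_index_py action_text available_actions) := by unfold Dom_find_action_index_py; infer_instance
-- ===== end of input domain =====

-- B replaces A's two sequential scans by a single pass keeping first-exact and first-containment accumulators (objective: alternative decomposition).


-- ===== PORT A =====
-- first loop of A: return i on the first exact (case-insensitive) match
def pvA_exactLoop (t : String) : List (Int × String) → Option Int
  | [] => none
  | (i, a) :: rest =>
      if PySem.Str.lower t = PySem.Str.lower a then some i else pvA_exactLoop t rest

-- second loop of A: return i on the first containment match (either direction)
def pvA_containLoop (t : String) : List (Int × String) → Option Int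
  | [] => none
  | (i, a) :: rest =>
      if PySem.Str.isIn (PySem.Str.lower a) (PySem.Str.lower t)
         || PySem.Str.isIn (PySem.Str.lower t) (PySem.Str.lower a)
      then some i else pvA_containLoop t rest

def find_action_index_py (action_text : String) (available_actions : List String) : Option Int :=
  if available_actions = [] then none
  else
    match pvA_exactLoop action_text (PySem.List.enumerate available_actions) with
    | some i => some i
    | none => pvA_containLoop action_text (PySem.List.enumerate available_actions)

-- ===== PORT B =====
-- one step of B's single pass: update (first_exact, first_contain)
def pvB_step (atl : String) (st : Option Int × Option Int) (p : Int × String) : Option Int × Option Int :=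
  let al := PySem.Str.lower p.2
  let fe := if st.1.isNone && (atl == al) then some p.1 else st.1
  let fc := if st.2.isNone && (PySem.Str.isIn al atl || PySem.Str.isIn atl al) then some p.1 else st.2
  (fe, fc)

def find_action_index_py_alt (action_text : String) (available_actions : List String) : Option Int :=
  let atl := PySem.Str.lower action_text
  let res := (PySem.List.enumerate available_actions).foldl (pvB_step atl) (none, none)
  match res.1 with
  | some i => some i
  | none => res.2

-- ===== PRECONDITION & SPEC =====
def Spec_find_action_index_py (action_text : String) (available_actions : List String) (out : Option Int) : Prop := out = find_action_index_py_alt action_text available_actions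
instance (action_text : String) (available_actions : List String) (out : Option Int) : Decidable (Spec_find_action_index_py action_text available_actions out) := by unfold Spec_find_action_index_py; infer_instance

-- ===== CLAIM (what is proved, stated in full; the proofs are below) =====
def Claim_equal_find_action_index_py : Prop := ∀ (action_text : String) (available_actions : List String), Dom_find_action_index_py action_text available_actions → Spec_find_action_index_py action_text available_actions (find_action_index_py action_text available_actions)

-- ===== LEMMAS AND PROOFS =====

-- B's fold from any state computes A's two loops, each shadowed by an already-found index
theorem pvB_fold_eq (t : String) (l : List (Int × String)) :
    ∀ (fe fc : Option Int),
      l.foldl (pvB_step (PySem.Str.lower t)) (fe, fc)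
        = (fe.or (pvA_exactLoop t l), fc.or (pvA_containLoop t l)) := by
  induction l with
  | nil => intro fe fc; simp [pvA_exactLoop, pvA_containLoop]
  | cons p rest ih =>
      intro fe fc
      obtain ⟨i, a⟩ := p
      simp only [List.foldl_cons, pvB_step, pvA_exactLoop, pvA_containLoop, ih]
      by_cases he : PySem.Str.lower t = PySem.Str.lower a <;>
        by_cases hc : (PySem.Str.isIn (PySem.Str.lower a) (PySem.Str.lower t)
            || PySem.Str.isIn (PySem.Str.lower t) (PySem.Str.lower a)) = true <;>
          cases fe <;> cases fc <;>
            simp_all [beq_iff_eq]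

-- ===== VERDICT (by name: the statement is the Claim_ definition above) =====
theorem find_action_index_py_spec : Claim_equal_find_action_index_py := by
  intro t xs _
  unfold Spec_find_action_index_py find_action_index_py find_action_index_py_alt
  simp only [pvB_fold_eq]
  by_cases h : xs = []
  · subst h; simp [PySem.List.enumerate, pvA_exactLoop, pvA_containLoop]
  · simp [h, Option.or]
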